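-- pv_equiv track=rewrite | github.com/Sarokiasamy2023/AIStoryGenerator | SalesforceAutomationRecorder/pdf_document_analyzer.py | _categorize_lines
-- ===== SOURCE A (Python) =====
-- from typing import List, Dict, Any
--
-- def _categorize_lines(lines: List[str]) -> Dict[str, List[str]]:
--     """Classify lines into functional buckets based on simple keywords."""
--     section_keywords = {
--         "Navigation": ["login", "navigate", "select the", "click", "open"],
--         "Report Lists": ["approved reports", "change requested", "in progress reports", "recently viewed", "submitted reports"],
--         "Form Interaction": ["start (if the form", "edit (if the form", "required fields", "form page", "section name", "click next"],
--         "Submission": ["submit for review", "submit to", "approval history", "status updates to submitted"],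
--         "PDF Generation": ["generate a pdf", "download pdf", "preview"],
--         "Change Requests": ["request changes", "change request"],
--         "Data Extracts": ["data extracts", "raw data report", "export"],
--     }
--
--     categorized: Dict[str, List[str]] = {k: [] for k in section_keywords}
--
--     for raw in lines:
--         line = raw.strip()
--         if not line:
--             continue
--         low = line.lower()
--         for section, keywords in section_keywords.items():
--             if any(k in low for k in keywords):
--                 if line not in categorized[section]:
--                     categorized[section].append(line)
--                 break
--
--     return categorized
-- ===== SOURCE B (Python) =====
-- from typing import List, Dict
--
-- def _categorize_lines(lines: List[str]) -> Dict[str, List[str]]: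
--     """Classify lines into functional buckets, section-major with a global assigned set."""
--     section_keywords = {
--         "Navigation": ["login", "navigate", "select the", "click", "open"],
--         "Report Lists": ["approved reports", "change requested", "in progress reports", "recently viewed", "submitted reports"],
--         "Form Interaction": ["start (if the form", "edit (if the form", "required fields", "form page", "section name", "click next"],
--         "Submission": ["submit for review", "submit to", "approval history", "status updates to submitted"],
--         "PDF Generation": ["generate a pdf", "download pdf", "preview"],
--         "Change Requests": ["request changes", "change request"],
--         "Data Extracts": ["data extracts", "raw data report", "export"],
--     }
--
--     assigned = set()
--     categorized: Dict[str, List[str]] = {}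
--     for section, keywords in section_keywords.items():
--         bucket = []
--         for raw in lines:
--             line = raw.strip()
--             if not line or line in assigned:
--                 continue
--             low = line.lower()
--             if any(k in low for k in keywords):
--                 bucket.append(line)
--                 assigned.add(line)
--         categorized[section] = bucket
--     return categorized
-- ===== Notes on version B (the rewrite author's own statement) =====
-- stated objective: alternative
-- what changed: Inverted the loop nesting to section-major: B iterates sections as the outer loop over a single pass of lines per section, replacing A's per-line first-match break and per-section membership lists with one global 'assigned' set that enforces both first-match-wins priority and deduplication.
import Mathlib
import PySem

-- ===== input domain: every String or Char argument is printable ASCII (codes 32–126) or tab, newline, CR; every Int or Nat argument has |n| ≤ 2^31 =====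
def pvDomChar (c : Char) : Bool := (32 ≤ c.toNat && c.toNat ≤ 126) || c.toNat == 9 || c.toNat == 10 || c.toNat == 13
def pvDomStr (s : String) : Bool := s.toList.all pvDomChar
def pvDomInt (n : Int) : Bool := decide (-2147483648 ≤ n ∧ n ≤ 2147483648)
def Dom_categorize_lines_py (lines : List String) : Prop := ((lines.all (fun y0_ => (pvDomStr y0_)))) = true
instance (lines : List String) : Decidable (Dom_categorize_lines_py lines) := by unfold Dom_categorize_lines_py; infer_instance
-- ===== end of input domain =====

-- One honest line: B re-traverses the data section-major with one global 'assigned' set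
-- instead of A's line-major first-match break with per-section membership lists (objective: alternative).

-- The section_keywords literal shared by both programs (pure data).
def pvSectionKeywords : List (String × List String) :=
  [("Navigation", ["login", "navigate", "select the", "click", "open"]),
   ("Report Lists", ["approved reports", "change requested", "in progress reports", "recently viewed", "submitted reports"]),
   ("Form Interaction", ["start (if the form", "edit (if the form", "required fields", "form page", "section name", "click next"]),
   ("Submission", ["submit for review", "submit to", "approval history", "status updates to submitted"]),
   ("PDF Generation", ["generate a pdf", "download pdf", "preview"]),
   ("Change Requests", ["request changes", "change request"]),
   ("Data Extracts", ["data extracts", "raw data report", "export"])]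

-- ===== PORT A =====
-- inner 'for section, keywords in section_keywords.items(): … break' loop of A
def pvLoopA (line low : String) : List (String × List String) → PySem.Dict String (List String) → PySem.Dict String (List String)
  | [], d => d
  | (sec, keywords) :: rest, d =>
    if keywords.any (fun k => PySem.Str.isIn k low) then
      (if line ∈ d.getD sec [] then d else d.insert sec (d.getD sec [] ++ [line]))
    else pvLoopA line low rest d

def pvStepA (d : PySem.Dict String (List String)) (raw : String) : PySem.Dict String (List String) :=
  let line := PySem.Str.strip raw
  if line = "" then d
  else pvLoopA line (PySem.Str.lower line) pvSectionKeywords d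

def categorize_lines_py (lines : List String) : List (String × List String) :=
  (lines.foldl pvStepA (PySem.Dict.ofList (pvSectionKeywords.map (fun p => (p.1, ([] : List String)))))).items

-- ===== PORT B =====
-- inner 'for raw in lines' loop of B: state = (bucket, assigned)
def pvStepB (keywords : List String) (st : List String × PySem.Set String) (raw : String) : List String × PySem.Set String :=
  let line := PySem.Str.strip raw
  if line = "" ∨ line ∈ st.2 then st
  else
    let low := PySem.Str.lower line
    if keywords.any (fun k => PySem.Str.isIn k low) then (st.1 ++ [line], PySem.Set.add st.2 line)
    else st

def categorize_lines_py_alt (lines : List String) : List (String × List String) :=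
  (pvSectionKeywords.foldl
    (fun (acc : List (String × List String) × PySem.Set String) p =>
      let r := lines.foldl (pvStepB p.2) ([], acc.2)
      (acc.1 ++ [(p.1, r.1)], r.2))
    ([], PySem.Set.empty)).1

-- ===== PRECONDITION & SPEC =====
def Spec_categorize_lines_py (lines : List String) (out : List (String × List String)) : Prop := out = categorize_lines_py_alt lines
instance (lines : List String) (out : List (String × List String)) : Decidable (Spec_categorize_lines_py lines out) := by unfold Spec_categorize_lines_py; infer_instance

-- ===== CLAIM (what is proved, stated in full; the proofs are below) =====
def Claim_equal_categorize_lines_py : Prop := ∀ (lines : List String), Dom_categorize_lines_py lines → Spec_categorize_lines_py lines (categorize_lines_py lines)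

-- ===== LEMMAS AND PROOFS =====

-- keyword match of a (stripped) line against one section's keyword list
def pvMatch (kws : List String) (line : String) : Bool :=
  kws.any (fun k => PySem.Str.isIn k (PySem.Str.lower line))

-- the section A's inner break-loop assigns a line to (first match in order)
def pvFirstSec : List (String × List String) → String → Option String
  | [], _ => none
  | (s, kws) :: rest, line => if pvMatch kws line then some s else pvFirstSec rest line

-- canonical stream picker: walk lines; skip empty/already-seen stripped lines; a line passing q is
-- emitted and added to the seen set σ
def pvPick (q : String → Bool) (σ : List String) : List String → List String
  | [] => []
  | raw :: rest =>
    let line := PySem.Str.strip raw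
    if line = "" ∨ line ∈ σ then pvPick q σ rest
    else if q line then line :: pvPick q (σ ++ [line]) rest
    else pvPick q σ rest

theorem pvStepB_fold (kws : List String) (lines : List String) :
    ∀ (b : List String) (σ : PySem.Set String),
    lines.foldl (pvStepB kws) (b, σ) =
      (b ++ pvPick (pvMatch kws) σ lines, σ ++ pvPick (pvMatch kws) σ lines) := by
  induction lines with
  | nil => intro b σ; simp [pvPick]
  | cons raw rest ih =>
    intro b σ
    by_cases h1 : PySem.Str.strip raw = "" ∨ PySem.Str.strip raw ∈ σ
    · have hs : pvStepB kws (b, σ) raw = (b, σ) := by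
        simp only [pvStepB]; rw [if_pos h1]
      simp only [List.foldl_cons, hs, ih, pvPick]
      rw [if_pos h1]
    · by_cases h2 : pvMatch kws (PySem.Str.strip raw) = true
      · have hnm : PySem.Str.strip raw ∉ σ := fun h => h1 (Or.inr h)
        have hs : pvStepB kws (b, σ) raw = (b ++ [PySem.Str.strip raw], σ ++ [PySem.Str.strip raw]) := by
          simp only [pvStepB]; rw [if_neg h1]
          simp only [pvMatch] at h2
          rw [if_pos h2, PySem.Set.add_of_not_mem hnm]
        simp only [List.foldl_cons, hs, ih, pvPick]
        rw [if_neg h1, if_pos h2]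
        simp
      · have hs : pvStepB kws (b, σ) raw = (b, σ) := by
          simp only [pvStepB]; rw [if_neg h1]
          simp only [pvMatch] at h2
          rw [if_neg h2]
        simp only [List.foldl_cons, hs, ih, pvPick]
        rw [if_neg h1, if_neg h2]

theorem pvPick_foldl (lines : List String) (q : String → Bool) :
    ∀ (acc : List String),
    lines.foldl (fun acc raw =>
        let line := PySem.Str.strip raw
        if line ≠ "" ∧ q line then (if line ∈ acc then acc else acc ++ [line]) else acc) acc
      = acc ++ pvPick q acc lines := by
  induction lines with
  | nil => intro acc; simp [pvPick]
  | cons raw rest ih =>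
    intro acc
    simp only [List.foldl_cons]
    show List.foldl _ (if PySem.Str.strip raw ≠ "" ∧ q (PySem.Str.strip raw) = true then
        (if PySem.Str.strip raw ∈ acc then acc else acc ++ [PySem.Str.strip raw]) else acc) rest = _
    by_cases he : PySem.Str.strip raw = ""
    · rw [if_neg (fun h => h.1 he), ih]
      simp only [pvPick]; rw [if_pos (Or.inl he)]
    · by_cases hq : q (PySem.Str.strip raw) = true
      · by_cases hm : PySem.Str.strip raw ∈ acc
        · rw [if_pos ⟨he, hq⟩, if_pos hm, ih]
          simp only [pvPick]; rw [if_pos (Or.inr hm)]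
        · rw [if_pos ⟨he, hq⟩, if_neg hm, ih]
          simp only [pvPick]
          rw [if_neg (by rintro (h | h); exact he h; exact hm h), if_pos hq]
          simp
      · rw [if_neg (fun h => hq h.2), ih]
        simp only [pvPick]
        by_cases hm : PySem.Str.strip raw ∈ acc
        · rw [if_pos (Or.inr hm)]
        · rw [if_neg (by rintro (h | h); exact he h; exact hm h), if_neg hq]

theorem pvPick_mem (q : String → Bool) (lines : List String) :
    ∀ (σ : List String) (l : String),
    l ∈ pvPick q σ lines ↔ l ∈ lines.map PySem.Str.strip ∧ l ≠ "" ∧ l ∉ σ ∧ q l = true := by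
  induction lines with
  | nil => intro σ l; simp [pvPick]
  | cons raw rest ih =>
    intro σ l
    simp only [pvPick, List.map_cons, List.mem_cons]
    by_cases h1 : PySem.Str.strip raw = "" ∨ PySem.Str.strip raw ∈ σ
    · rw [if_pos h1, ih]
      constructor
      · rintro ⟨hm, hne, hns, hql⟩; exact ⟨Or.inr hm, hne, hns, hql⟩
      · rintro ⟨hm | hm, hne, hns, hql⟩
        · subst hm; rcases h1 with h | h; exact absurd h hne; exact absurd h hns
        · exact ⟨hm, hne, hns, hql⟩
    · push Not at h1
      obtain ⟨hne, hns⟩ := h1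
      rw [if_neg (by rintro (h | h); exact hne h; exact hns h)]
      by_cases hq : q (PySem.Str.strip raw) = true
      · rw [if_pos hq]
        simp only [List.mem_cons, ih]
        constructor
        · rintro (rfl | ⟨hm, hne', hns', hql⟩)
          · exact ⟨Or.inl rfl, hne, hns, hq⟩
          · refine ⟨Or.inr hm, hne', fun h => hns' (List.mem_append_left _ h), hql⟩
        · rintro ⟨hm | hm, hne', hns', hql⟩
          · exact Or.inl hm
          · by_cases hl : l = PySem.Str.strip raw
            · exact Or.inl hl
            · refine Or.inr ⟨hm, hne', fun h => ?_, hql⟩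
              rcases List.mem_append.mp h with h | h
              · exact hns' h
              · simp at h; exact hl h
      · rw [if_neg hq, ih]
        constructor
        · rintro ⟨hm, hne', hns', hql⟩; exact ⟨Or.inr hm, hne', hns', hql⟩
        · rintro ⟨hm | hm, hne', hns', hql⟩
          · subst hm; exact absurd hql hq
          · exact ⟨hm, hne', hns', hql⟩

theorem pvPick_congr (lines : List String) :
    ∀ (q₁ q₂ : String → Bool) (σ₁ σ₂ : List String),
    (∀ l, l ∈ lines.map PySem.Str.strip → l ≠ "" →
      ((l ∈ σ₁ ∧ l ∈ σ₂) ∨ (l ∉ σ₁ ∧ l ∉ σ₂ ∧ q₁ l = q₂ l) ∨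
       (l ∈ σ₁ ∧ l ∉ σ₂ ∧ q₂ l = false) ∨ (l ∉ σ₁ ∧ l ∈ σ₂ ∧ q₁ l = false))) →
    pvPick q₁ σ₁ lines = pvPick q₂ σ₂ lines := by
  induction lines with
  | nil => intro q₁ q₂ σ₁ σ₂ _; simp [pvPick]
  | cons raw rest ih =>
    intro q₁ q₂ σ₁ σ₂ H
    have Hrest : ∀ l, l ∈ rest.map PySem.Str.strip → l ≠ "" →
        ((l ∈ σ₁ ∧ l ∈ σ₂) ∨ (l ∉ σ₁ ∧ l ∉ σ₂ ∧ q₁ l = q₂ l) ∨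
         (l ∈ σ₁ ∧ l ∉ σ₂ ∧ q₂ l = false) ∨ (l ∉ σ₁ ∧ l ∈ σ₂ ∧ q₁ l = false)) :=
      fun l hl => H l (by rw [List.map_cons]; exact List.mem_cons_of_mem _ hl)
    simp only [pvPick]
    by_cases he : PySem.Str.strip raw = ""
    · rw [if_pos (Or.inl he : PySem.Str.strip raw = "" ∨ PySem.Str.strip raw ∈ σ₁),
          if_pos (Or.inl he : PySem.Str.strip raw = "" ∨ PySem.Str.strip raw ∈ σ₂)]
      exact ih _ _ _ _ Hrest
    · have Hhead := H (PySem.Str.strip raw) (by simp) he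
      have n1 : ∀ (σ : List String), PySem.Str.strip raw ∉ σ →
          ¬(PySem.Str.strip raw = "" ∨ PySem.Str.strip raw ∈ σ) := by
        rintro σ hn (h | h); exact he h; exact hn h
      rcases Hhead with ⟨h1, h2⟩ | ⟨h1, h2, hq⟩ | ⟨h1, h2, hq⟩ | ⟨h1, h2, hq⟩
      · rw [if_pos (Or.inr h1 : PySem.Str.strip raw = "" ∨ PySem.Str.strip raw ∈ σ₁),
            if_pos (Or.inr h2 : PySem.Str.strip raw = "" ∨ PySem.Str.strip raw ∈ σ₂)]
        exact ih _ _ _ _ Hrest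
      · rw [if_neg (n1 σ₁ h1), if_neg (n1 σ₂ h2), hq]
        by_cases hq2 : q₂ (PySem.Str.strip raw) = true
        · rw [if_pos hq2, if_pos hq2]
          have := ih q₁ q₂ (σ₁ ++ [PySem.Str.strip raw]) (σ₂ ++ [PySem.Str.strip raw]) ?_
          · rw [this]
          · intro l hl hne
            rcases Hrest l hl hne with ⟨a1, a2⟩ | ⟨a1, a2, aq⟩ | ⟨a1, a2, aq⟩ | ⟨a1, a2, aq⟩
            · exact Or.inl ⟨List.mem_append_left _ a1, List.mem_append_left _ a2⟩
            · by_cases hl2 : l = PySem.Str.strip raw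
              · subst hl2; exact Or.inl ⟨by simp, by simp⟩
              · exact Or.inr (Or.inl ⟨by simp [a1, hl2], by simp [a2, hl2], aq⟩)
            · refine Or.inr (Or.inr (Or.inl ⟨List.mem_append_left _ a1, ?_, aq⟩))
              by_cases hl2 : l = PySem.Str.strip raw
              · subst hl2; exact absurd a1 h1
              · simp [a2, hl2]
            · refine Or.inr (Or.inr (Or.inr ⟨?_, List.mem_append_left _ a2, aq⟩))
              by_cases hl2 : l = PySem.Str.strip raw
              · subst hl2; exact absurd a2 h2
              · simp [a1, hl2]
        · rw [if_neg hq2, if_neg hq2]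
          exact ih _ _ _ _ Hrest
      · rw [if_pos (Or.inr h1 : PySem.Str.strip raw = "" ∨ PySem.Str.strip raw ∈ σ₁),
            if_neg (n1 σ₂ h2), if_neg (by simp [hq] : ¬(q₂ (PySem.Str.strip raw) = true))]
        exact ih _ _ _ _ Hrest
      · rw [if_neg (n1 σ₁ h1), if_pos (Or.inr h2 : PySem.Str.strip raw = "" ∨ PySem.Str.strip raw ∈ σ₂),
            if_neg (by simp [hq] : ¬(q₁ (PySem.Str.strip raw) = true))]
        exact ih _ _ _ _ Hrest

-- A's per-section accumulation step (what the dict entry for section n undergoes per line)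
def pvStepSec (n : String) (acc : List String) (raw : String) : List String :=
  let line := PySem.Str.strip raw
  if line ≠ "" ∧ (pvFirstSec pvSectionKeywords line == some n) = true
  then (if line ∈ acc then acc else acc ++ [line]) else acc

theorem pvStepSec_hit {raw n : String} (he : PySem.Str.strip raw ≠ "")
    (hfs : pvFirstSec pvSectionKeywords (PySem.Str.strip raw) = some n) (acc : List String) :
    pvStepSec n acc raw = if PySem.Str.strip raw ∈ acc then acc else acc ++ [PySem.Str.strip raw] := by
  simp [pvStepSec, he, hfs]

theorem pvStepSec_miss_empty {raw : String} (he : PySem.Str.strip raw = "") (n : String) (acc : List String) :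
    pvStepSec n acc raw = acc := by
  simp [pvStepSec, he]

theorem pvStepSec_miss_ne {raw n m : String} (hfs : pvFirstSec pvSectionKeywords (PySem.Str.strip raw) = some m)
    (hne : m ≠ n) (acc : List String) : pvStepSec n acc raw = acc := by
  simp [pvStepSec, hfs, hne]

theorem pvStepSec_miss_none {raw : String} (hfs : pvFirstSec pvSectionKeywords (PySem.Str.strip raw) = none)
    (n : String) (acc : List String) : pvStepSec n acc raw = acc := by
  simp [pvStepSec, hfs]

theorem foldl_pvStepSec (lines : List String) (n : String) (acc : List String) :
    lines.foldl (pvStepSec n) acc = acc ++ pvPick (fun l => pvFirstSec pvSectionKeywords l == some n) acc lines :=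
  pvPick_foldl lines (fun l => pvFirstSec pvSectionKeywords l == some n) acc

-- the shape of A's dict through the fold over lines
theorem pvA_shape (lines : List String) :
    ∀ l1 l2 l3 l4 l5 l6 l7 : List String,
    lines.foldl pvStepA (PySem.Dict.mk
      [("Navigation", l1), ("Report Lists", l2), ("Form Interaction", l3), ("Submission", l4),
       ("PDF Generation", l5), ("Change Requests", l6), ("Data Extracts", l7)]) =
    PySem.Dict.mk
      [("Navigation", lines.foldl (pvStepSec "Navigation") l1),
       ("Report Lists", lines.foldl (pvStepSec "Report Lists") l2),
       ("Form Interaction", lines.foldl (pvStepSec "Form Interaction") l3),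
       ("Submission", lines.foldl (pvStepSec "Submission") l4),
       ("PDF Generation", lines.foldl (pvStepSec "PDF Generation") l5),
       ("Change Requests", lines.foldl (pvStepSec "Change Requests") l6),
       ("Data Extracts", lines.foldl (pvStepSec "Data Extracts") l7)] := by
  induction lines with
  | nil => intro l1 l2 l3 l4 l5 l6 l7; rfl
  | cons raw rest ih =>
    intro l1 l2 l3 l4 l5 l6 l7
    simp only [List.foldl_cons]
    set D := PySem.Dict.mk [("Navigation", l1), ("Report Lists", l2), ("Form Interaction", l3), ("Submission", l4), ("PDF Generation", l5), ("Change Requests", l6), ("Data Extracts", l7)] with hD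
    by_cases he : PySem.Str.strip raw = ""
    · have hstep : pvStepA D raw = D := by
        simp only [pvStepA]; rw [if_pos he]
      rw [hstep, hD, ih l1 l2 l3 l4 l5 l6 l7]
      refine congrArg PySem.Dict.mk ?_
      simp only [pvStepSec_miss_empty he]
    · have hstep : pvStepA D raw =
          pvLoopA (PySem.Str.strip raw) (PySem.Str.lower (PySem.Str.strip raw)) pvSectionKeywords D := by
        simp only [pvStepA]; rw [if_neg he]
      rw [hstep]
      simp only [pvSectionKeywords, pvLoopA]
      by_cases c1 : (["login", "navigate", "select the", "click", "open"].any fun k => PySem.Str.isIn k (PySem.Str.lower (PySem.Str.strip raw))) = true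
      · rw [if_pos c1]
        have hfs : pvFirstSec pvSectionKeywords (PySem.Str.strip raw) = some "Navigation" := by
          simp only [pvFirstSec, pvSectionKeywords, pvMatch]; rw [if_pos c1]
        have hg : D.getD "Navigation" [] = l1 := by
          rw [hD]; simp [PySem.Dict.getD, PySem.Dict.get?]
        rw [hg]
        by_cases hmem : PySem.Str.strip raw ∈ l1
        · rw [if_pos hmem, hD, ih l1 l2 l3 l4 l5 l6 l7]
          refine congrArg PySem.Dict.mk ?_
          rw [pvStepSec_hit he hfs l1, pvStepSec_miss_ne hfs (by decide) l2, pvStepSec_miss_ne hfs (by decide) l3, pvStepSec_miss_ne hfs (by decide) l4, pvStepSec_miss_ne hfs (by decide) l5, pvStepSec_miss_ne hfs (by decide) l6, pvStepSec_miss_ne hfs (by decide) l7, if_pos hmem]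
        · have hins : D.insert "Navigation" (l1 ++ [PySem.Str.strip raw]) = PySem.Dict.mk [("Navigation", l1 ++ [PySem.Str.strip raw]), ("Report Lists", l2), ("Form Interaction", l3), ("Submission", l4), ("PDF Generation", l5), ("Change Requests", l6), ("Data Extracts", l7)] := by
            rw [hD]; simp [PySem.Dict.insert]
          rw [if_neg hmem, hins, ih (l1 ++ [PySem.Str.strip raw]) l2 l3 l4 l5 l6 l7]
          refine congrArg PySem.Dict.mk ?_
          rw [pvStepSec_hit he hfs l1, pvStepSec_miss_ne hfs (by decide) l2, pvStepSec_miss_ne hfs (by decide) l3, pvStepSec_miss_ne hfs (by decide) l4, pvStepSec_miss_ne hfs (by decide) l5, pvStepSec_miss_ne hfs (by decide) l6, pvStepSec_miss_ne hfs (by decide) l7, if_neg hmem]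
      · rw [if_neg c1]
        by_cases c2 : (["approved reports", "change requested", "in progress reports", "recently viewed", "submitted reports"].any fun k => PySem.Str.isIn k (PySem.Str.lower (PySem.Str.strip raw))) = true
        · rw [if_pos c2]
          have hfs : pvFirstSec pvSectionKeywords (PySem.Str.strip raw) = some "Report Lists" := by
            simp only [pvFirstSec, pvSectionKeywords, pvMatch]; rw [if_neg c1, if_pos c2]
          have hg : D.getD "Report Lists" [] = l2 := by
            rw [hD]; simp [PySem.Dict.getD, PySem.Dict.get?]
          rw [hg]
          by_cases hmem : PySem.Str.strip raw ∈ l2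
          · rw [if_pos hmem, hD, ih l1 l2 l3 l4 l5 l6 l7]
            refine congrArg PySem.Dict.mk ?_
            rw [pvStepSec_miss_ne hfs (by decide) l1, pvStepSec_hit he hfs l2, pvStepSec_miss_ne hfs (by decide) l3, pvStepSec_miss_ne hfs (by decide) l4, pvStepSec_miss_ne hfs (by decide) l5, pvStepSec_miss_ne hfs (by decide) l6, pvStepSec_miss_ne hfs (by decide) l7, if_pos hmem]
          · have hins : D.insert "Report Lists" (l2 ++ [PySem.Str.strip raw]) = PySem.Dict.mk [("Navigation", l1), ("Report Lists", l2 ++ [PySem.Str.strip raw]), ("Form Interaction", l3), ("Submission", l4), ("PDF Generation", l5), ("Change Requests", l6), ("Data Extracts", l7)] := by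
              rw [hD]; simp [PySem.Dict.insert]
            rw [if_neg hmem, hins, ih l1 (l2 ++ [PySem.Str.strip raw]) l3 l4 l5 l6 l7]
            refine congrArg PySem.Dict.mk ?_
            rw [pvStepSec_miss_ne hfs (by decide) l1, pvStepSec_hit he hfs l2, pvStepSec_miss_ne hfs (by decide) l3, pvStepSec_miss_ne hfs (by decide) l4, pvStepSec_miss_ne hfs (by decide) l5, pvStepSec_miss_ne hfs (by decide) l6, pvStepSec_miss_ne hfs (by decide) l7, if_neg hmem]
        · rw [if_neg c2]
          by_cases c3 : (["start (if the form", "edit (if the form", "required fields", "form page", "section name", "click next"].any fun k => PySem.Str.isIn k (PySem.Str.lower (PySem.Str.strip raw))) = true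
          · rw [if_pos c3]
            have hfs : pvFirstSec pvSectionKeywords (PySem.Str.strip raw) = some "Form Interaction" := by
              simp only [pvFirstSec, pvSectionKeywords, pvMatch]; rw [if_neg c1, if_neg c2, if_pos c3]
            have hg : D.getD "Form Interaction" [] = l3 := by
              rw [hD]; simp [PySem.Dict.getD, PySem.Dict.get?]
            rw [hg]
            by_cases hmem : PySem.Str.strip raw ∈ l3
            · rw [if_pos hmem, hD, ih l1 l2 l3 l4 l5 l6 l7]
              refine congrArg PySem.Dict.mk ?_
              rw [pvStepSec_miss_ne hfs (by decide) l1, pvStepSec_miss_ne hfs (by decide) l2, pvStepSec_hit he hfs l3, pvStepSec_miss_ne hfs (by decide) l4, pvStepSec_miss_ne hfs (by decide) l5, pvStepSec_miss_ne hfs (by decide) l6, pvStepSec_miss_ne hfs (by decide) l7, if_pos hmem]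
            · have hins : D.insert "Form Interaction" (l3 ++ [PySem.Str.strip raw]) = PySem.Dict.mk [("Navigation", l1), ("Report Lists", l2), ("Form Interaction", l3 ++ [PySem.Str.strip raw]), ("Submission", l4), ("PDF Generation", l5), ("Change Requests", l6), ("Data Extracts", l7)] := by
                rw [hD]; simp [PySem.Dict.insert]
              rw [if_neg hmem, hins, ih l1 l2 (l3 ++ [PySem.Str.strip raw]) l4 l5 l6 l7]
              refine congrArg PySem.Dict.mk ?_
              rw [pvStepSec_miss_ne hfs (by decide) l1, pvStepSec_miss_ne hfs (by decide) l2, pvStepSec_hit he hfs l3, pvStepSec_miss_ne hfs (by decide) l4, pvStepSec_miss_ne hfs (by decide) l5, pvStepSec_miss_ne hfs (by decide) l6, pvStepSec_miss_ne hfs (by decide) l7, if_neg hmem]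
          · rw [if_neg c3]
            by_cases c4 : (["submit for review", "submit to", "approval history", "status updates to submitted"].any fun k => PySem.Str.isIn k (PySem.Str.lower (PySem.Str.strip raw))) = true
            · rw [if_pos c4]
              have hfs : pvFirstSec pvSectionKeywords (PySem.Str.strip raw) = some "Submission" := by
                simp only [pvFirstSec, pvSectionKeywords, pvMatch]; rw [if_neg c1, if_neg c2, if_neg c3, if_pos c4]
              have hg : D.getD "Submission" [] = l4 := by
                rw [hD]; simp [PySem.Dict.getD, PySem.Dict.get?]
              rw [hg]
              by_cases hmem : PySem.Str.strip raw ∈ l4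
              · rw [if_pos hmem, hD, ih l1 l2 l3 l4 l5 l6 l7]
                refine congrArg PySem.Dict.mk ?_
                rw [pvStepSec_miss_ne hfs (by decide) l1, pvStepSec_miss_ne hfs (by decide) l2, pvStepSec_miss_ne hfs (by decide) l3, pvStepSec_hit he hfs l4, pvStepSec_miss_ne hfs (by decide) l5, pvStepSec_miss_ne hfs (by decide) l6, pvStepSec_miss_ne hfs (by decide) l7, if_pos hmem]
              · have hins : D.insert "Submission" (l4 ++ [PySem.Str.strip raw]) = PySem.Dict.mk [("Navigation", l1), ("Report Lists", l2), ("Form Interaction", l3), ("Submission", l4 ++ [PySem.Str.strip raw]), ("PDF Generation", l5), ("Change Requests", l6), ("Data Extracts", l7)] := by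
                  rw [hD]; simp [PySem.Dict.insert]
                rw [if_neg hmem, hins, ih l1 l2 l3 (l4 ++ [PySem.Str.strip raw]) l5 l6 l7]
                refine congrArg PySem.Dict.mk ?_
                rw [pvStepSec_miss_ne hfs (by decide) l1, pvStepSec_miss_ne hfs (by decide) l2, pvStepSec_miss_ne hfs (by decide) l3, pvStepSec_hit he hfs l4, pvStepSec_miss_ne hfs (by decide) l5, pvStepSec_miss_ne hfs (by decide) l6, pvStepSec_miss_ne hfs (by decide) l7, if_neg hmem]
            · rw [if_neg c4]
              by_cases c5 : (["generate a pdf", "download pdf", "preview"].any fun k => PySem.Str.isIn k (PySem.Str.lower (PySem.Str.strip raw))) = true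
              · rw [if_pos c5]
                have hfs : pvFirstSec pvSectionKeywords (PySem.Str.strip raw) = some "PDF Generation" := by
                  simp only [pvFirstSec, pvSectionKeywords, pvMatch]; rw [if_neg c1, if_neg c2, if_neg c3, if_neg c4, if_pos c5]
                have hg : D.getD "PDF Generation" [] = l5 := by
                  rw [hD]; simp [PySem.Dict.getD, PySem.Dict.get?]
                rw [hg]
                by_cases hmem : PySem.Str.strip raw ∈ l5
                · rw [if_pos hmem, hD, ih l1 l2 l3 l4 l5 l6 l7]
                  refine congrArg PySem.Dict.mk ?_
                  rw [pvStepSec_miss_ne hfs (by decide) l1, pvStepSec_miss_ne hfs (by decide) l2, pvStepSec_miss_ne hfs (by decide) l3, pvStepSec_miss_ne hfs (by decide) l4, pvStepSec_hit he hfs l5, pvStepSec_miss_ne hfs (by decide) l6, pvStepSec_miss_ne hfs (by decide) l7, if_pos hmem]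
                · have hins : D.insert "PDF Generation" (l5 ++ [PySem.Str.strip raw]) = PySem.Dict.mk [("Navigation", l1), ("Report Lists", l2), ("Form Interaction", l3), ("Submission", l4), ("PDF Generation", l5 ++ [PySem.Str.strip raw]), ("Change Requests", l6), ("Data Extracts", l7)] := by
                    rw [hD]; simp [PySem.Dict.insert]
                  rw [if_neg hmem, hins, ih l1 l2 l3 l4 (l5 ++ [PySem.Str.strip raw]) l6 l7]
                  refine congrArg PySem.Dict.mk ?_
                  rw [pvStepSec_miss_ne hfs (by decide) l1, pvStepSec_miss_ne hfs (by decide) l2, pvStepSec_miss_ne hfs (by decide) l3, pvStepSec_miss_ne hfs (by decide) l4, pvStepSec_hit he hfs l5, pvStepSec_miss_ne hfs (by decide) l6, pvStepSec_miss_ne hfs (by decide) l7, if_neg hmem]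
              · rw [if_neg c5]
                by_cases c6 : (["request changes", "change request"].any fun k => PySem.Str.isIn k (PySem.Str.lower (PySem.Str.strip raw))) = true
                · rw [if_pos c6]
                  have hfs : pvFirstSec pvSectionKeywords (PySem.Str.strip raw) = some "Change Requests" := by
                    simp only [pvFirstSec, pvSectionKeywords, pvMatch]; rw [if_neg c1, if_neg c2, if_neg c3, if_neg c4, if_neg c5, if_pos c6]
                  have hg : D.getD "Change Requests" [] = l6 := by
                    rw [hD]; simp [PySem.Dict.getD, PySem.Dict.get?]
                  rw [hg]
                  by_cases hmem : PySem.Str.strip raw ∈ l6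
                  · rw [if_pos hmem, hD, ih l1 l2 l3 l4 l5 l6 l7]
                    refine congrArg PySem.Dict.mk ?_
                    rw [pvStepSec_miss_ne hfs (by decide) l1, pvStepSec_miss_ne hfs (by decide) l2, pvStepSec_miss_ne hfs (by decide) l3, pvStepSec_miss_ne hfs (by decide) l4, pvStepSec_miss_ne hfs (by decide) l5, pvStepSec_hit he hfs l6, pvStepSec_miss_ne hfs (by decide) l7, if_pos hmem]
                  · have hins : D.insert "Change Requests" (l6 ++ [PySem.Str.strip raw]) = PySem.Dict.mk [("Navigation", l1), ("Report Lists", l2), ("Form Interaction", l3), ("Submission", l4), ("PDF Generation", l5), ("Change Requests", l6 ++ [PySem.Str.strip raw]), ("Data Extracts", l7)] := by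
                      rw [hD]; simp [PySem.Dict.insert]
                    rw [if_neg hmem, hins, ih l1 l2 l3 l4 l5 (l6 ++ [PySem.Str.strip raw]) l7]
                    refine congrArg PySem.Dict.mk ?_
                    rw [pvStepSec_miss_ne hfs (by decide) l1, pvStepSec_miss_ne hfs (by decide) l2, pvStepSec_miss_ne hfs (by decide) l3, pvStepSec_miss_ne hfs (by decide) l4, pvStepSec_miss_ne hfs (by decide) l5, pvStepSec_hit he hfs l6, pvStepSec_miss_ne hfs (by decide) l7, if_neg hmem]
                · rw [if_neg c6]
                  by_cases c7 : (["data extracts", "raw data report", "export"].any fun k => PySem.Str.isIn k (PySem.Str.lower (PySem.Str.strip raw))) = true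
                  · rw [if_pos c7]
                    have hfs : pvFirstSec pvSectionKeywords (PySem.Str.strip raw) = some "Data Extracts" := by
                      simp only [pvFirstSec, pvSectionKeywords, pvMatch]; rw [if_neg c1, if_neg c2, if_neg c3, if_neg c4, if_neg c5, if_neg c6, if_pos c7]
                    have hg : D.getD "Data Extracts" [] = l7 := by
                      rw [hD]; simp [PySem.Dict.getD, PySem.Dict.get?]
                    rw [hg]
                    by_cases hmem : PySem.Str.strip raw ∈ l7
                    · rw [if_pos hmem, hD, ih l1 l2 l3 l4 l5 l6 l7]
                      refine congrArg PySem.Dict.mk ?_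
                      rw [pvStepSec_miss_ne hfs (by decide) l1, pvStepSec_miss_ne hfs (by decide) l2, pvStepSec_miss_ne hfs (by decide) l3, pvStepSec_miss_ne hfs (by decide) l4, pvStepSec_miss_ne hfs (by decide) l5, pvStepSec_miss_ne hfs (by decide) l6, pvStepSec_hit he hfs l7, if_pos hmem]
                    · have hins : D.insert "Data Extracts" (l7 ++ [PySem.Str.strip raw]) = PySem.Dict.mk [("Navigation", l1), ("Report Lists", l2), ("Form Interaction", l3), ("Submission", l4), ("PDF Generation", l5), ("Change Requests", l6), ("Data Extracts", l7 ++ [PySem.Str.strip raw])] := by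
                        rw [hD]; simp [PySem.Dict.insert]
                      rw [if_neg hmem, hins, ih l1 l2 l3 l4 l5 l6 (l7 ++ [PySem.Str.strip raw])]
                      refine congrArg PySem.Dict.mk ?_
                      rw [pvStepSec_miss_ne hfs (by decide) l1, pvStepSec_miss_ne hfs (by decide) l2, pvStepSec_miss_ne hfs (by decide) l3, pvStepSec_miss_ne hfs (by decide) l4, pvStepSec_miss_ne hfs (by decide) l5, pvStepSec_miss_ne hfs (by decide) l6, pvStepSec_hit he hfs l7, if_neg hmem]
                  · rw [if_neg c7]
                    have hfs : pvFirstSec pvSectionKeywords (PySem.Str.strip raw) = none := by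
                      simp only [pvFirstSec, pvSectionKeywords, pvMatch]; rw [if_neg c1, if_neg c2, if_neg c3, if_neg c4, if_neg c5, if_neg c6, if_neg c7]
                    rw [hD, ih l1 l2 l3 l4 l5 l6 l7]
                    refine congrArg PySem.Dict.mk ?_
                    rw [pvStepSec_miss_none hfs "Navigation" l1, pvStepSec_miss_none hfs "Report Lists" l2,
                        pvStepSec_miss_none hfs "Form Interaction" l3, pvStepSec_miss_none hfs "Submission" l4,
                        pvStepSec_miss_none hfs "PDF Generation" l5, pvStepSec_miss_none hfs "Change Requests" l6,
                        pvStepSec_miss_none hfs "Data Extracts" l7]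


theorem pvFirstSec_mem_of_some : ∀ (secs : List (String × List String)) (l m : String),
    pvFirstSec secs l = some m → m ∈ secs.map Prod.fst := by
  intro secs
  induction secs with
  | nil => intro l m h; simp [pvFirstSec] at h
  | cons p rest ih =>
    intro l m h
    rcases p with ⟨s, kws⟩
    simp only [pvFirstSec] at h
    by_cases hq : pvMatch kws l = true
    · rw [if_pos hq] at h
      simp only [Option.some.injEq] at h
      simp [h]
    · rw [if_neg hq] at h
      simpa using Or.inr (ih l m h)

theorem pvFirstSec_append_nomatch : ∀ (done : List (String × List String)) (rest : List (String × List String)) (l : String),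
    (∀ p ∈ done, pvMatch p.2 l = false) → pvFirstSec (done ++ rest) l = pvFirstSec rest l := by
  intro done
  induction done with
  | nil => intro rest l _; rfl
  | cons p dn ih =>
    intro rest l h
    rcases p with ⟨s, kws⟩
    have h0 : pvMatch kws l = false := h _ (List.mem_cons_self ..)
    simp only [List.cons_append, pvFirstSec]
    rw [if_neg (by simp [h0])]
    exact ih rest l (fun q hq => h q (List.mem_cons_of_mem _ hq))

theorem pvFirstSec_append_match : ∀ (done : List (String × List String)) (rest : List (String × List String)) (l : String),
    (∃ p ∈ done, pvMatch p.2 l = true) →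
    ∃ m ∈ done.map Prod.fst, pvFirstSec (done ++ rest) l = some m := by
  intro done
  induction done with
  | nil => intro rest l h; simp at h
  | cons p dn ih =>
    intro rest l h
    rcases p with ⟨s, kws⟩
    by_cases hq : pvMatch kws l = true
    · exact ⟨s, by simp, by simp only [List.cons_append, pvFirstSec]; rw [if_pos hq]⟩
    · have h' : ∃ q ∈ dn, pvMatch q.2 l = true := by
        rcases h with ⟨q, hq1, hq2⟩
        rcases List.mem_cons.mp hq1 with rfl | hmem
        · exact absurd hq2 hq
        · exact ⟨q, hmem, hq2⟩
      obtain ⟨m, hm1, hm2⟩ := ih rest l h'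
      refine ⟨m, by simp [hm1], ?_⟩
      simp only [List.cons_append, pvFirstSec]
      rw [if_neg hq]
      exact hm2

theorem pvSec_q_eq (done rest : List (String × List String)) (n : String) (kws : List String)
    (hsplit : pvSectionKeywords = done ++ (n, kws) :: rest)
    (hn2 : n ∉ rest.map Prod.fst)
    (l : String) (hnom : ∀ p ∈ done, pvMatch p.2 l = false) :
    (pvFirstSec pvSectionKeywords l == some n) = pvMatch kws l := by
  rw [hsplit, pvFirstSec_append_nomatch done _ l hnom]
  simp only [pvFirstSec]
  by_cases hq : pvMatch kws l = true
  · rw [if_pos hq, hq]; simp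
  · rw [if_neg hq]
    have hne : pvFirstSec rest l ≠ some n :=
      fun hcon => hn2 (pvFirstSec_mem_of_some rest l n hcon)
    rw [Bool.not_eq_true] at hq
    rw [hq]
    exact beq_eq_false_iff_ne.mpr hne

theorem pvSec_q_false (done rest : List (String × List String)) (n : String) (kws : List String)
    (hsplit : pvSectionKeywords = done ++ (n, kws) :: rest)
    (hn1 : n ∉ done.map Prod.fst)
    (l : String) (hmatch : ∃ p ∈ done, pvMatch p.2 l = true) :
    (pvFirstSec pvSectionKeywords l == some n) = false := by
  rw [hsplit]
  obtain ⟨m, hm, hsome⟩ := pvFirstSec_append_match done ((n, kws) :: rest) l hmatch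
  rw [hsome]
  exact beq_eq_false_iff_ne.mpr (fun hcon => hn1 (by
    have : m = n := by simpa using hcon
    exact this ▸ hm))

-- recursive characterization of B's outer fold
def pvBSpec (lines : List String) : List (String × List String) → PySem.Set String → List (String × List String) × PySem.Set String
  | [], σ => ([], σ)
  | (n, kws) :: rest, σ =>
    ((n, pvPick (pvMatch kws) σ lines) :: (pvBSpec lines rest (σ ++ pvPick (pvMatch kws) σ lines)).1,
     (pvBSpec lines rest (σ ++ pvPick (pvMatch kws) σ lines)).2)

theorem pvB_fold_char (lines : List String) : ∀ (secs : List (String × List String)) (out : List (String × List String)) (σ : PySem.Set String),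
    secs.foldl (fun (acc : List (String × List String) × PySem.Set String) p =>
      let r := lines.foldl (pvStepB p.2) ([], acc.2)
      (acc.1 ++ [(p.1, r.1)], r.2)) (out, σ)
    = (out ++ (pvBSpec lines secs σ).1, (pvBSpec lines secs σ).2) := by
  intro secs
  induction secs with
  | nil => intro out σ; simp [pvBSpec]
  | cons p rest ih =>
    intro out σ
    rcases p with ⟨n, kws⟩
    simp only [List.foldl_cons]
    rw [pvStepB_fold kws lines [] σ]
    show List.foldl _ (out ++ [(n, pvPick (pvMatch kws) σ lines)], σ ++ pvPick (pvMatch kws) σ lines) rest = _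
    rw [ih (out ++ [(n, pvPick (pvMatch kws) σ lines)]) (σ ++ pvPick (pvMatch kws) σ lines)]
    simp [pvBSpec]

theorem pvMain_sections (lines : List String) : ∀ (secs done : List (String × List String)) (σ : List String),
    pvSectionKeywords = done ++ secs →
    (∀ l, l ∈ σ ↔ (l ∈ lines.map PySem.Str.strip ∧ l ≠ "" ∧ ∃ p ∈ done, pvMatch p.2 l = true)) →
    (pvBSpec lines secs σ).1 =
      secs.map (fun p => (p.1, pvPick (fun l => pvFirstSec pvSectionKeywords l == some p.1) [] lines)) := by
  have hnd : (pvSectionKeywords.map Prod.fst).Nodup := by decide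
  intro secs
  induction secs with
  | nil => intro done σ _ _; rfl
  | cons p rest ih =>
    intro done σ hsplit hσ
    rcases p with ⟨n, kws⟩
    have hnd' : ((done.map Prod.fst) ++ (n :: rest.map Prod.fst)).Nodup := by
      have := hnd; rw [hsplit] at this; simpa using this
    have hn1 : n ∉ done.map Prod.fst := by
      rcases List.nodup_append.mp hnd' with ⟨_, _, hdisj⟩
      exact fun h => hdisj n h n (List.mem_cons_self ..) rfl
    have hn2 : n ∉ rest.map Prod.fst := by
      rcases List.nodup_append.mp hnd' with ⟨_, hcons, _⟩
      exact (List.nodup_cons.mp hcons).1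
    simp only [pvBSpec, List.map_cons]
    have hhead : pvPick (pvMatch kws) σ lines =
        pvPick (fun l => pvFirstSec pvSectionKeywords l == some n) [] lines := by
      refine pvPick_congr lines _ _ _ _ ?_
      intro l hl hne
      by_cases hm : l ∈ σ
      · refine Or.inr (Or.inr (Or.inl ⟨hm, by simp, ?_⟩))
        exact pvSec_q_false done rest n kws hsplit hn1 l ((hσ l).mp hm).2.2
      · refine Or.inr (Or.inl ⟨hm, by simp, ?_⟩)
        have hnom : ∀ p ∈ done, pvMatch p.2 l = false := by
          intro p hp
          by_cases hb : pvMatch p.2 l = true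
          · exact absurd ((hσ l).mpr ⟨hl, hne, p, hp, hb⟩) hm
          · simpa using hb
        exact (pvSec_q_eq done rest n kws hsplit hn2 l hnom).symm
    rw [hhead]
    congr 1
    · rw [← hhead]
      refine ih (done ++ [(n, kws)]) (σ ++ pvPick (pvMatch kws) σ lines) (by simpa using hsplit) ?_
      intro l
      rw [List.mem_append, hσ l, pvPick_mem (pvMatch kws) lines σ l]
      constructor
      · rintro (⟨h1, h2, p, hp, hb⟩ | ⟨h1, h2, h3, hb⟩)
        · exact ⟨h1, h2, p, by simp [hp], hb⟩
        · exact ⟨h1, h2, (n, kws), by simp, hb⟩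
      · rintro ⟨h1, h2, p, hp, hb⟩
        rcases List.mem_append.mp hp with hp | hp
        · exact Or.inl ⟨h1, h2, p, hp, hb⟩
        · by_cases hm : l ∈ σ
          · exact Or.inl ((hσ l).mp hm)
          · simp only [List.mem_singleton] at hp
            subst hp
            exact Or.inr ⟨h1, h2, hm, hb⟩

-- ===== VERDICT (by name: the statement is the Claim_ definition above) =====
theorem categorize_lines_py_spec : Claim_equal_categorize_lines_py := by
  intro lines _
  unfold Spec_categorize_lines_py categorize_lines_py categorize_lines_py_alt
  rw [show (PySem.Dict.ofList (pvSectionKeywords.map (fun p => (p.1, ([] : List String))))) =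
      PySem.Dict.mk [("Navigation", ([] : List String)), ("Report Lists", []), ("Form Interaction", []),
        ("Submission", []), ("PDF Generation", []), ("Change Requests", []), ("Data Extracts", [])] from rfl]
  rw [pvA_shape lines [] [] [] [] [] [] []]
  rw [pvB_fold_char lines pvSectionKeywords [] PySem.Set.empty]
  rw [pvMain_sections lines pvSectionKeywords [] PySem.Set.empty rfl (by simp [PySem.Set.empty])]
  simp only [foldl_pvStepSec, List.nil_append]
  rfl
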